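-- pv_equiv track=rewrite | github.com/sam-flahive/dyl-encryption | dyl_0.1.py | reverse_letter_output_IV
-- ===== SOURCE A (Python) =====
-- list_of_letters_IV = '$I)C!0/E^Qvd9*]1{Pyuk3zZ[~(?f+=nY"BFwDV4Octr,p#_G;\'xK-Nh7T>&:S.MHeo<sba6 i5X£%UmJRg2qlA}8@jWL|'
--
-- def reverse_letter_output_IV(letter, value):
--          order_of_letters = {}
--          for let in list_of_letters_IV:
--                   if value % 94 == 0:
--                            order_of_letters[let] = 94
--                   else:
--                            order_of_letters[let] = value % 94
--                   value += 1
--          return(order_of_letters[letter])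
-- ===== SOURCE B (Python) =====
-- list_of_letters_IV = '$I)C!0/E^Qvd9*]1{Pyuk3zZ[~(?f+=nY"BFwDV4Octr,p#_G;\'xK-Nh7T>&:S.MHeo<sba6 i5X£%UmJRg2qlA}8@jWL|'
--
-- # Position index built ONCE at import time (A rebuilds a 94-entry rotating dict on
-- # every call).  Per call: one O(1) hash lookup and one branch-free modular formula
-- # ((x-1) % 94 + 1 maps residue 0 to 94 directly, no if).
-- _POS = {c: i for i, c in enumerate(list_of_letters_IV)}
--
-- def reverse_letter_output_IV(letter, value):
--     return (value + _POS[letter] - 1) % 94 + 1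
-- ===== Notes on version B (the rewrite author's own statement) =====
-- stated objective: faster
-- what changed: A builds a fresh 94-entry rotating dict on every call and looks the letter up in it; B builds a char->position hash index once at module load and each call is one O(1) lookup plus the branch-free formula (value+pos-1)%94+1 (which sends residue 0 to 94 without a conditional).
import Mathlib
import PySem

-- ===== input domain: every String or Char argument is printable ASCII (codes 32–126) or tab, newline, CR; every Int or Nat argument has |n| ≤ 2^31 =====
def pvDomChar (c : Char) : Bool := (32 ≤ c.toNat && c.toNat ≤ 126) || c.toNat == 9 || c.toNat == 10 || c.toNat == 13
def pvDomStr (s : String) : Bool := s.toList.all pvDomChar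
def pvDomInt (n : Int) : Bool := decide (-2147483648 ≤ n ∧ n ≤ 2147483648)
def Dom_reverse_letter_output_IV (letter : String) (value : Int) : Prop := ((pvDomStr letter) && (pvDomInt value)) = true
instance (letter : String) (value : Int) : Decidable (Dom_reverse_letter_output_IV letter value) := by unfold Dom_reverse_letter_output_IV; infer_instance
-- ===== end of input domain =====

-- B builds the char->position index once at module level and answers each call with one
-- lookup and the branch-free formula (value+pos-1)%94+1, instead of A's per-call rotating dict.

-- ===== PORT A =====
def list_of_letters_IV : String := "$I)C!0/E^Qvd9*]1{Pyuk3zZ[~(?f+=nY\"BFwDV4Octr,p#_G;'xK-Nh7T>&:S.MHeo<sba6 i5X£%UmJRg2qlA}8@jWL|"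

-- loop body of A: insert the current rotating value for this character, then value += 1
def pvStepA (st : PySem.Dict String Int × Int) (let_ : Char) : PySem.Dict String Int × Int :=
  let order := if PySem.Int.mod st.2 94 = 0
    then st.1.insert (String.mk [let_]) 94
    else st.1.insert (String.mk [let_]) (PySem.Int.mod st.2 94)
  (order, st.2 + 1)

def reverse_letter_output_IV (letter : String) (value : Int) : Int :=
  -- order_of_letters[letter]: KeyError when letter is not a key — excluded by Pre_
  (((list_of_letters_IV.toList.foldl pvStepA (PySem.Dict.empty, value)).1).get? letter).getD 0

-- ===== PORT B =====
-- _POS = {c: i for i, c in enumerate(list_of_letters_IV)}   (built once, not per call)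
def pvPos : PySem.Dict String Int :=
  (PySem.List.enumerate list_of_letters_IV.toList 0).foldl
    (fun d p => d.insert (String.mk [p.2]) p.1) PySem.Dict.empty

def reverse_letter_output_IV_alt (letter : String) (value : Int) : Int :=
  -- _POS[letter]: KeyError when absent — excluded by Pre_
  PySem.Int.mod (value + (pvPos.get? letter).getD 0 - 1) 94 + 1

-- ===== PRECONDITION & SPEC =====
-- Pre_ excludes exactly the inputs where A raises KeyError: letter must be one of the
-- single-character keys of A's dict, i.e. a character of the constant string.
def Pre_reverse_letter_output_IV (letter : String) (value : Int) : Prop :=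
  letter ∈ list_of_letters_IV.toList.map (fun c => String.mk [c])
instance (letter : String) (value : Int) : Decidable (Pre_reverse_letter_output_IV letter value) := by
  unfold Pre_reverse_letter_output_IV; infer_instance

def pvWitness_reverse_letter_output_IV : String × Int := ("$", 0)

def Spec_reverse_letter_output_IV (letter : String) (value : Int) (out : Int) : Prop := out = reverse_letter_output_IV_alt letter value
instance (letter : String) (value : Int) (out : Int) : Decidable (Spec_reverse_letter_output_IV letter value out) := by unfold Spec_reverse_letter_output_IV; infer_instance

-- ===== CLAIM (what is proved, stated in full; the proofs are below) =====
def Claim_equal_reverse_letter_output_IV : Prop := ∀ (letter : String) (value : Int), Dom_reverse_letter_output_IV letter value → Pre_reverse_letter_output_IV letter value → Spec_reverse_letter_output_IV letter value (reverse_letter_output_IV letter value)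

-- ===== LEMMAS AND PROOFS =====

-- the rotating value A assigns at absolute counter x
def pvAdj (x : Int) : Int := if PySem.Int.mod x 94 = 0 then 94 else PySem.Int.mod x 94

theorem pv_mkS_toList (c : Char) : (String.mk [c]).toList = [c] := Eq.symm (String.ofList_eq.mp rfl)

theorem pv_mkS_inj {a b : Char} (h : String.mk [a] = String.mk [b]) : a = b := by
  have h2 := congrArg String.toList h
  rw [pv_mkS_toList, pv_mkS_toList] at h2
  simpa using h2

theorem pv_stepA_eq (st : PySem.Dict String Int × Int) (c : Char) :
    pvStepA st c = (st.1.insert (String.mk [c]) (pvAdj st.2), st.2 + 1) := by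
  unfold pvStepA pvAdj
  split_ifs <;> rfl

theorem pv_fold_skip (cs : List Char) (k : String) :
    ∀ st : PySem.Dict String Int × Int, (∀ c ∈ cs, String.mk [c] ≠ k) →
    ((cs.foldl pvStepA st).1).get? k = (st.1).get? k := by
  induction cs with
  | nil => intro st _; rfl
  | cons a rest ih =>
    intro st h
    simp only [List.foldl_cons]
    rw [ih _ (fun c hc => h c (List.mem_cons_of_mem _ hc)), pv_stepA_eq]
    exact PySem.Dict.get?_insert_of_ne _ _ (fun he => h a (List.mem_cons_self) he.symm)

theorem pv_fold_get (cs : List Char) (c : Char) (hnd : cs.Nodup) (hc : c ∈ cs)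
    (d : PySem.Dict String Int) (v : Int) :
    ((cs.foldl pvStepA (d, v)).1).get? (String.mk [c]) = some (pvAdj (v + cs.idxOf c)) := by
  induction cs generalizing d v with
  | nil => cases hc
  | cons a rest ih =>
    simp only [List.foldl_cons, pv_stepA_eq]
    by_cases hca : c = a
    · subst hca
      have hnotin : c ∉ rest := (List.nodup_cons.mp hnd).1
      rw [pv_fold_skip rest (String.mk [c]) _
            (fun c' hc' he => hnotin (pv_mkS_inj he ▸ hc'))]
      rw [PySem.Dict.get?_insert_self]
      simp
    · have hcr : c ∈ rest := (List.mem_cons.mp hc).resolve_left hca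
      rw [ih (List.nodup_cons.mp hnd).2 hcr]
      have : (v + 1) + (rest.idxOf c : Int) = v + ((a :: rest).idxOf c : Int) := by
        rw [List.idxOf_cons_ne _ (by exact fun h => hca h.symm)]
        push_cast
        ring
      rw [this]

-- B's index fold ignores keys that never occur in the remaining characters
theorem pv_posfold_skip (cs : List Char) (s : Int) (k : String)
    (d : PySem.Dict String Int) (h : ∀ c ∈ cs, String.mk [c] ≠ k) :
    (((PySem.List.enumerate cs s).foldl
        (fun d p => d.insert (String.mk [p.2]) p.1) d)).get? k = d.get? k := by
  induction cs generalizing s d with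
  | nil => simp [PySem.List.enumerate_nil]
  | cons a rest ih =>
    rw [PySem.List.enumerate_cons]
    simp only [List.foldl_cons]
    rw [ih _ _ (fun c hc => h c (List.mem_cons_of_mem _ hc))]
    exact PySem.Dict.get?_insert_of_ne _ _ (fun he => h a (List.mem_cons_self) he.symm)

-- B's index fold assigns each character of a duplicate-free list its index (offset by s)
theorem pv_posfold_get (cs : List Char) (c : Char) (hnd : cs.Nodup) (hc : c ∈ cs)
    (s : Int) (d : PySem.Dict String Int) :
    (((PySem.List.enumerate cs s).foldl
        (fun d p => d.insert (String.mk [p.2]) p.1) d)).get? (String.mk [c])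
      = some (s + cs.idxOf c) := by
  induction cs generalizing s d with
  | nil => cases hc
  | cons a rest ih =>
    rw [PySem.List.enumerate_cons]
    simp only [List.foldl_cons]
    by_cases hca : c = a
    · subst hca
      have hnotin : c ∉ rest := (List.nodup_cons.mp hnd).1
      rw [pv_posfold_skip rest _ (String.mk [c]) _
            (fun c' hc' he => hnotin (pv_mkS_inj he ▸ hc'))]
      rw [PySem.Dict.get?_insert_self]
      simp
    · have hcr : c ∈ rest := (List.mem_cons.mp hc).resolve_left hca
      rw [ih (List.nodup_cons.mp hnd).2 hcr]
      rw [List.idxOf_cons_ne _ (by exact fun h => hca h.symm)]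
      congr 1
      push_cast
      ring

-- the branchy rotating value equals B's branch-free formula
theorem pv_adj_formula (x : Int) : pvAdj x = PySem.Int.mod (x - 1) 94 + 1 := by
  unfold pvAdj
  simp only [PySem.Int.mod_eq_emod_of_pos (by norm_num : (0:Int) < 94)]
  split_ifs with h <;> omega

-- ===== VERDICT (by name: the statement is the Claim_ definition above) =====
theorem reverse_letter_output_IV_spec : Claim_equal_reverse_letter_output_IV := by
  intro letter value _ hpre
  unfold Pre_reverse_letter_output_IV at hpre
  obtain ⟨c, hc, rfl⟩ := List.mem_map.mp hpre
  have hnd : list_of_letters_IV.toList.Nodup := by decide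
  unfold Spec_reverse_letter_output_IV reverse_letter_output_IV reverse_letter_output_IV_alt pvPos
  rw [pv_fold_get _ c hnd hc, pv_posfold_get _ c hnd hc]
  simp only [Option.getD_some, pv_adj_formula]
  congr 2
  ring
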